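-- pv_equiv track=rewrite | github.com/james0032/TiePin | utils/deduplicate_paths.py | parse_intermediate_nodes
-- ===== SOURCE A (Python) =====
-- from typing import Dict, Set
--
-- def parse_intermediate_nodes(node_str: str) -> Set[str]:
--     """Parse the intermediate nodes string into a set of nodes.
--
--     Handles both simple format: [NODE1, NODE2, NODE3]
--     and nested format: [NODE1, NODE2, [NODE3, NODE4, NODE5]]
--     """
--     node_str = node_str.strip()
--
--     # Remove outer brackets if present
--     if node_str.startswith('[') and node_str.endswith(']'):
--         node_str = node_str[1:-1]
--
--     nodes = set()
--     current_node = ""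
--     bracket_depth = 0
--
--     for char in node_str:
--         if char == '[':
--             bracket_depth += 1
--             # Don't include the bracket itself
--         elif char == ']':
--             bracket_depth -= 1
--             # Don't include the bracket itself
--         elif char == ',' and bracket_depth == 0:
--             # We're at a top-level comma, so save the current node
--             if current_node.strip():
--                 nodes.add(current_node.strip())
--             current_node = ""
--         else:
--             current_node += char
--
--     # Add the last node
--     if current_node.strip():
--         nodes.add(current_node.strip())
--
--     return nodes
-- ===== SOURCE B (Python) =====
-- def parse_intermediate_nodes(node_str: str):
--     """Parse the intermediate nodes string into a set of nodes.
--
--     Cut-index formulation: a comma separates top-level nodes exactly when the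
--     brackets before it balance ('[' count equals ']' count in the prefix), so we
--     collect those comma indices directly and slice the string at the resulting
--     boundaries; each slice is cleaned (bracket characters dropped, stripped).
--     """
--     s = node_str.strip()
--     if s.startswith('[') and s.endswith(']'):
--         s = s[1:-1]
--
--     cuts = [i for i, ch in enumerate(s)
--             if ch == ',' and s[:i].count('[') == s[:i].count(']')]
--
--     nodes = set()
--     for start, end in zip([0] + [i + 1 for i in cuts], cuts + [len(s)]):
--         name = ''.join(c for c in s[start:end] if c not in '[]').strip()
--         if name:
--             nodes.add(name)
--     return nodes
-- ===== Notes on version B (the rewrite author's own statement) =====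
-- stated objective: alternative
-- what changed: Replaces A's single stateful scan (running bracket depth, incrementally built current node, set insertion interleaved in one loop body) by a direct cut-index formulation: a comma is top-level iff the opening and closing bracket counts agree in its prefix, so B collects those comma indices with prefix counting, zips the resulting boundaries into (start, end) pairs and cleans each slice.
import Mathlib
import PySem

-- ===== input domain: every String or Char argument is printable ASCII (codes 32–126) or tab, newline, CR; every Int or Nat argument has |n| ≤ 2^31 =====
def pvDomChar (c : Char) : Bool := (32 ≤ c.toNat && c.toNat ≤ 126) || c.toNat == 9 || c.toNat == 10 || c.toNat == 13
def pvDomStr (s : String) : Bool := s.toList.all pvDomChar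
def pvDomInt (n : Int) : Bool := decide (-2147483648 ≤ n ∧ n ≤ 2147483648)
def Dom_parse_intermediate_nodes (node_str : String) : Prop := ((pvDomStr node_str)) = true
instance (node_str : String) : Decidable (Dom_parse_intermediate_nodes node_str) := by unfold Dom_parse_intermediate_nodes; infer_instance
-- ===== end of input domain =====

-- B: same behaviour by a different algorithm — instead of a single depth-tracking scan,
-- B finds the top-level comma positions directly (a comma is top-level iff opening and
-- closing bracket counts agree in its prefix), zips the boundaries and cleans each slice.


-- ===== PORT A =====
-- one step of A's character loop; state = (nodes, current_node, bracket_depth)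
def pvAStep (st : PySem.Set String × List Char × Int) (c : Char) :
    PySem.Set String × List Char × Int :=
  if c = '[' then (st.1, st.2.1, st.2.2 + 1)
  else if c = ']' then (st.1, st.2.1, st.2.2 - 1)
  else if c = ',' ∧ st.2.2 = 0 then
    (if PySem.Chars.strip st.2.1 ≠ [] then
       PySem.Set.add st.1 (String.ofList (PySem.Chars.strip st.2.1)) else st.1, [], st.2.2)
  else (st.1, st.2.1 ++ [c], st.2.2)

def parse_intermediate_nodes (node_str : String) : List String :=
  let s := PySem.Chars.strip node_str.toList
  let s := if PySem.Chars.startswith s ['['] && PySem.Chars.endswith s [']']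
           then PySem.Chars.slice s (some 1) (some (-1)) else s
  let st := s.foldl pvAStep ((PySem.Set.empty : PySem.Set String), [], 0)
  if PySem.Chars.strip st.2.1 ≠ [] then
    PySem.Set.add st.1 (String.ofList (PySem.Chars.strip st.2.1))
  else st.1

-- ===== PORT B =====
-- the comprehension's filter: ch == ',' and s[:i].count('[') == s[:i].count(']')
def pvIsTop (s : List Char) (ic : Int × Char) : Option Int :=
  if ic.2 == ',' &&
     (PySem.Chars.count (PySem.Chars.slice s none (some ic.1)) ['['] ==
      PySem.Chars.count (PySem.Chars.slice s none (some ic.1)) [']'])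
  then some ic.1 else none

-- name = ''.join(c for c in segment if c not in '[]').strip()
def pvClean (seg : List Char) : List Char :=
  PySem.Chars.strip (seg.filter (fun c => !(c == '[' || c == ']')))

-- loop body: if name: nodes.add(name)
def pvCleanStep (nodes : PySem.Set String) (seg : List Char) : PySem.Set String :=
  if pvClean seg ≠ [] then PySem.Set.add nodes (String.ofList (pvClean seg)) else nodes

def parse_intermediate_nodes_alt (node_str : String) : List String :=
  let s := PySem.Chars.strip node_str.toList
  let s := if PySem.Chars.startswith s ['['] && PySem.Chars.endswith s [']']
           then PySem.Chars.slice s (some 1) (some (-1)) else s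
  -- cuts = [i for i, ch in enumerate(s) if ch == ',' and s[:i].count('[') == s[:i].count(']')]
  let cuts := (PySem.List.enumerate s).filterMap (pvIsTop s)
  -- for start, end in zip([0] + [i + 1 for i in cuts], cuts + [len(s)]): …
  (List.zip ((0 : Int) :: cuts.map (· + 1)) (cuts ++ [(s.length : Int)])).foldl
    (fun nodes se => pvCleanStep nodes (PySem.Chars.slice s (some se.1) (some se.2)))
    PySem.Set.empty

-- ===== PRECONDITION & SPEC =====
def Spec_parse_intermediate_nodes (node_str : String) (out : List String) : Prop := out = parse_intermediate_nodes_alt node_str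
instance (node_str : String) (out : List String) : Decidable (Spec_parse_intermediate_nodes node_str out) := by unfold Spec_parse_intermediate_nodes; infer_instance

-- ===== CLAIM (what is proved, stated in full; the proofs are below) =====
def Claim_equal_parse_intermediate_nodes : Prop := ∀ (node_str : String), Dom_parse_intermediate_nodes node_str → Spec_parse_intermediate_nodes node_str (parse_intermediate_nodes node_str)

-- ===== LEMMAS AND PROOFS =====

-- str.count of a single character equals List.count
lemma pvCount_go_one (c x : Char) (xs : List Char) (n acc : Nat) :
    PySem.Chars.count.go [c] (n+1) (x :: xs) acc
      = PySem.Chars.count.go [c] n xs (if c = x then acc + 1 else acc) := by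
  rw [PySem.Chars.count.go]
  simp [List.isPrefixOf]
  split_ifs <;> simp_all

lemma pvCount_go (c : Char) (xs : List Char) (acc : Nat) :
    PySem.Chars.count.go [c] xs.length xs acc = acc + xs.count c := by
  induction xs generalizing acc with
  | nil => simp [PySem.Chars.count.go]
  | cons x xs ih =>
    rw [List.length_cons, pvCount_go_one, ih]
    by_cases h : c = x
    · subst h; rw [List.count_cons_self]; simp; omega
    · rw [List.count_cons_of_ne (by exact fun hh => h hh.symm)]; simp [h]

lemma pvCount_singleton (xs : List Char) (c : Char) :
    PySem.Chars.count xs [c] = xs.count c := by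
  simp [PySem.Chars.count, pvCount_go]

-- the common segmentation both programs compute: split at commas seen at depth d = 0
def splitTop : List Char → Int → List (List Char)
  | [], _ => [[]]
  | c :: cs, d =>
    if c = '[' then (splitTop cs (d+1)).modifyHead (c :: ·)
    else if c = ']' then (splitTop cs (d-1)).modifyHead (c :: ·)
    else if c = ',' ∧ d = 0 then [] :: splitTop cs d
    else (splitTop cs d).modifyHead (c :: ·)

-- cut indices, relative form: a/b = bracket counts of the already-consumed prefix
def cutsK : List Char → Nat → Nat → List Nat
  | [], _, _ => []
  | c :: cs, a, b =>
    (if c = ',' ∧ a = b then [0] else []) ++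
      (cutsK cs (a + if c = '[' then 1 else 0) (b + if c = ']' then 1 else 0)).map (· + 1)

-- B's boundary-zipping segmentation, in Nat form
def pvSegs (s : List Char) (cuts : List Nat) : List (List Char) :=
  (List.zip (0 :: cuts.map (· + 1)) (cuts ++ [s.length])).map
    (fun se => (s.drop se.1).take (se.2 - se.1))

-- A's finishing step (adding the last node)
def pvFinish (st : PySem.Set String × List Char × Int) : PySem.Set String :=
  if PySem.Chars.strip st.2.1 ≠ [] then
    PySem.Set.add st.1 (String.ofList (PySem.Chars.strip st.2.1))
  else st.1

-- the bracket filter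
def pvDebr (cs : List Char) : List Char := cs.filter (fun c => !(c == '[' || c == ']'))

-- ---------- A-side: A's loop computes the clean-fold of splitTop ----------
lemma pv_coreA (cs : List Char) (seg : List Char) (d : Int) (nodes : PySem.Set String) :
    pvFinish (cs.foldl pvAStep (nodes, pvDebr seg, d)) =
      ((splitTop cs d).modifyHead (seg ++ ·)).foldl pvCleanStep nodes := by
  induction cs generalizing seg d nodes with
  | nil =>
    simp [splitTop, pvFinish, pvCleanStep, pvClean, pvDebr]
  | cons c cs ih =>
    simp only [List.foldl_cons]
    by_cases hb : c = '['
    · subst hb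
      have h1 : pvAStep (nodes, pvDebr seg, d) '[' = (nodes, pvDebr seg, d + 1) := by
        simp [pvAStep]
      have h3 : pvDebr seg = pvDebr (seg ++ ['[']) := by simp [pvDebr]
      rw [h1, h3, ih]
      simp [splitTop, List.modifyHead_modifyHead, Function.comp_def]
    · by_cases hc : c = ']'
      · subst hc
        have h1 : pvAStep (nodes, pvDebr seg, d) ']' = (nodes, pvDebr seg, d - 1) := by
          simp [pvAStep]
        have h3 : pvDebr seg = pvDebr (seg ++ [']']) := by simp [pvDebr]
        rw [h1, h3, ih]
        simp [splitTop, List.modifyHead_modifyHead, Function.comp_def]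
      · by_cases hcm : c = ',' ∧ d = 0
        · obtain ⟨hcm, hd⟩ := hcm; subst hcm; subst hd
          have h1 : pvAStep (nodes, pvDebr seg, 0) ',' =
              (pvCleanStep nodes seg, [], 0) := by
            simp [pvAStep, pvCleanStep, pvClean, pvDebr]
          rw [h1]
          have h3 := ih [] 0 (pvCleanStep nodes seg)
          simp only [pvDebr, List.filter_nil] at h3
          rw [h3]
          rw [show (fun x : List Char => [] ++ x) = id from funext (fun x => by simp),
              List.modifyHead_id,
              show splitTop (',' :: cs) 0 = [] :: splitTop cs 0 by simp [splitTop]]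
          simp
        · have h1 : pvAStep (nodes, pvDebr seg, d) c = (nodes, pvDebr seg ++ [c], d) := by
            simp [pvAStep, hb, hc, hcm]
          have h3 : pvDebr seg ++ [c] = pvDebr (seg ++ [c]) := by
            simp [pvDebr, hb, hc]
          rw [h1, h3, ih]
          have h4 : splitTop (c :: cs) d = (splitTop cs d).modifyHead (c :: ·) := by
            simp [splitTop, hb, hc, hcm]
          rw [h4]
          simp [List.modifyHead_modifyHead, Function.comp_def]

-- ---------- zip/slice shifting ----------
lemma pvZip_shift (X Y : List Nat) :
    List.zip (X.map (· + 1)) (Y.map (· + 1)) =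
      (List.zip X Y).map (fun p => (p.1 + 1, p.2 + 1)) := by
  simpa [Prod.map] using (List.zip_map (f := (· + 1)) (g := (· + 1)) (l₁ := X) (l₂ := Y))

lemma pvSlice_shift (c : Char) (cs : List Char) (Z : List (Nat × Nat)) :
    (Z.map (fun p => (p.1 + 1, p.2 + 1))).map
        (fun se => ((c :: cs).drop se.1).take (se.2 - se.1)) =
      Z.map (fun se => (cs.drop se.1).take (se.2 - se.1)) := by
  rw [List.map_map]
  exact List.map_congr_left (fun p _ => by simp [Nat.succ_sub_succ])

lemma pvSegs_comma (c : Char) (cs : List Char) (K : List Nat) :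
    pvSegs (c :: cs) (0 :: K.map (· + 1)) = [] :: pvSegs cs K := by
  unfold pvSegs
  simp only [List.map_cons, List.cons_append, List.zip_cons_cons, List.map_cons,
    List.length_cons]
  rw [show K.map (· + 1) ++ [cs.length + 1] = (K ++ [cs.length]).map (· + 1) by simp,
      show ((0 : Nat) + 1) :: (K.map (· + 1)).map (· + 1)
            = ((0 : Nat) :: K.map (· + 1)).map (· + 1) by simp,
      pvZip_shift, pvSlice_shift]
  simp

lemma pvSegs_shift (c : Char) (cs : List Char) (K : List Nat) :
    pvSegs (c :: cs) (K.map (· + 1)) = (pvSegs cs K).modifyHead (c :: ·) := by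
  cases K with
  | nil =>
    simp [pvSegs]
  | cons j R =>
    unfold pvSegs
    simp only [List.map_cons, List.cons_append, List.zip_cons_cons, List.map_cons,
      List.length_cons]
    rw [show R.map (· + 1) ++ [cs.length + 1] = (R ++ [cs.length]).map (· + 1) by simp,
        show (j + 1 + 1) :: (R.map (· + 1)).map (· + 1)
              = ((j + 1) :: R.map (· + 1)).map (· + 1) by simp,
        pvZip_shift, pvSlice_shift]
    simp

-- ---------- B-side main: boundary segmentation equals splitTop ----------
lemma pvSegs_cutsK (cs : List Char) (a b : Nat) :
    pvSegs cs (cutsK cs a b) = splitTop cs ((a : Int) - (b : Int)) := by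
  induction cs generalizing a b with
  | nil => simp [cutsK, pvSegs, splitTop]
  | cons c cs ih =>
    by_cases hb : c = '['
    · subst hb
      rw [show cutsK ('[' :: cs) a b = (cutsK cs (a+1) b).map (· + 1) by simp [cutsK],
          pvSegs_shift, ih,
          show splitTop ('[' :: cs) ((a:Int) - b)
            = (splitTop cs ((a:Int) - b + 1)).modifyHead ('[' :: ·) by simp [splitTop]]
      congr 2
      push_cast; ring
    · by_cases hc : c = ']'
      · subst hc
        rw [show cutsK (']' :: cs) a b = (cutsK cs a (b+1)).map (· + 1) by simp [cutsK],
            pvSegs_shift, ih,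
            show splitTop (']' :: cs) ((a:Int) - b)
              = (splitTop cs ((a:Int) - b - 1)).modifyHead (']' :: ·) by simp [splitTop]]
        congr 2
        push_cast; ring
      · by_cases hcm : c = ',' ∧ a = b
        · obtain ⟨h1, h2⟩ := hcm; subst h1; subst h2
          rw [show cutsK (',' :: cs) a a = 0 :: (cutsK cs a a).map (· + 1) by
                simp [cutsK],
              pvSegs_comma, ih,
              show splitTop (',' :: cs) ((a:Int) - a) = [] :: splitTop cs ((a:Int) - a) by
                simp [splitTop]]
        · have hk : cutsK (c :: cs) a b = (cutsK cs a b).map (· + 1) := by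
            simp [cutsK, hb, hc, hcm]
          have hs : splitTop (c :: cs) ((a:Int) - b)
              = (splitTop cs ((a:Int) - b)).modifyHead (c :: ·) := by
            have hnc : ¬ (c = ',' ∧ (a:Int) - b = 0) := by
              rintro ⟨h1, h2⟩; exact hcm ⟨h1, by omega⟩
            simp [splitTop, hb, hc, hnc]
          rw [hk, pvSegs_shift, ih, hs]

-- ---------- B's cut list equals cutsK ----------
lemma pvChars_slice_eq (xs : List Char) (a b : Option Int) :
    PySem.Chars.slice xs a b = PySem.List.slice xs a b := rfl

lemma pvCuts_gen (cs p : List Char) :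
    (PySem.List.enumerate cs (p.length : Int)).filterMap (pvIsTop (p ++ cs)) =
      (cutsK cs (p.count '[') (p.count ']')).map (fun n => ((p.length + n : Nat) : Int)) := by
  induction cs generalizing p with
  | nil => simp [cutsK, PySem.List.enumerate_nil]
  | cons c cs ih =>
    rw [PySem.List.enumerate_cons, List.filterMap_cons]
    have hhead : pvIsTop (p ++ c :: cs) ((p.length : Int), c)
        = if c = ',' ∧ p.count '[' = p.count ']' then some ((p.length : Int)) else none := by
      unfold pvIsTop
      rw [pvChars_slice_eq, PySem.List.slice_to_natCast, List.take_left, pvCount_singleton,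
          pvCount_singleton]
      rcases Classical.em (c = ',' ∧ p.count '[' = p.count ']') with h | h
      · simp [h.1, h.2]
      · rw [if_neg h, if_neg]
        intro hb
        simp only [Bool.and_eq_true, beq_iff_eq] at hb
        exact h ⟨hb.1, hb.2⟩
    have hcnt1 : (p ++ [c]).count '[' = p.count '[' + if c = '[' then 1 else 0 := by
      rcases Classical.em (c = '[') with h | h
      · simp [List.count_append, h]
      · simp [List.count_append, h]
    have hcnt2 : (p ++ [c]).count ']' = p.count ']' + if c = ']' then 1 else 0 := by
      rcases Classical.em (c = ']') with h | h
      · simp [List.count_append, h]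
      · simp [List.count_append, h]
    have htail := ih (p ++ [c])
    rw [show ((p ++ [c]).length : Int) = (p.length : Int) + 1 by simp,
        List.append_assoc, List.singleton_append, hcnt1, hcnt2] at htail
    have htail' : List.filterMap (pvIsTop (p ++ c :: cs))
          (PySem.List.enumerate cs ((p.length : Int) + 1))
        = (cutsK cs (p.count '[' + if c = '[' then 1 else 0)
            (p.count ']' + if c = ']' then 1 else 0)).map
              ((fun n => ((p.length + n : Nat) : Int)) ∘ (· + 1)) := by
      rw [htail]
      refine List.map_congr_left ?_
      intro n _
      simp only [Function.comp_apply, List.length_append, List.length_cons, List.length_nil]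
      push_cast
      ring
    rw [hhead, htail',
        show cutsK (c :: cs) (p.count '[') (p.count ']')
          = (if c = ',' ∧ p.count '[' = p.count ']' then [0] else []) ++
              (cutsK cs (p.count '[' + if c = '[' then 1 else 0)
                (p.count ']' + if c = ']' then 1 else 0)).map (· + 1) from rfl,
        List.map_append, List.map_map]
    rcases Classical.em (c = ',' ∧ p.count '[' = p.count ']') with h | h
    · rw [if_pos h, if_pos h]
      simp
    · rw [if_neg h, if_neg h]
      simp

-- ---------- assembly ----------
lemma pv_main (t : List Char) :
    pvFinish (t.foldl pvAStep ((PySem.Set.empty : PySem.Set String), [], 0)) =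
      (List.zip ((0 : Int) :: ((PySem.List.enumerate t).filterMap (pvIsTop t)).map (· + 1))
          (((PySem.List.enumerate t).filterMap (pvIsTop t)) ++ [(t.length : Int)])).foldl
        (fun nodes se => pvCleanStep nodes (PySem.Chars.slice t (some se.1) (some se.2)))
        PySem.Set.empty := by
  have hA := pv_coreA t [] 0 PySem.Set.empty
  simp only [pvDebr, List.filter_nil] at hA
  rw [hA, show (fun x : List Char => [] ++ x) = id from funext (fun x => by simp),
      List.modifyHead_id]
  have hc := pvCuts_gen t []
  simp only [List.length_nil, Nat.cast_zero, List.nil_append, Nat.zero_add,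
    List.count_nil] at hc
  rw [hc]
  rw [show List.map (fun x : Int => x + 1) (List.map (fun n : Nat => (n : Int)) (cutsK t 0 0))
        = List.map (fun n : Nat => (n : Int)) (List.map (fun x : Nat => x + 1) (cutsK t 0 0)) by
        rw [List.map_map, List.map_map]
        refine List.map_congr_left ?_
        intro n _
        simp only [Function.comp_apply]
        push_cast
        ring,
      show ((0 : Int) :: List.map (fun n : Nat => (n : Int))
              (List.map (fun x : Nat => x + 1) (cutsK t 0 0)))
        = List.map (fun n : Nat => (n : Int))
            ((0 : Nat) :: List.map (fun x : Nat => x + 1) (cutsK t 0 0)) by simp,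
      show List.map (fun n : Nat => (n : Int)) (cutsK t 0 0) ++ [(t.length : Int)]
        = List.map (fun n : Nat => (n : Int)) ((cutsK t 0 0) ++ [t.length]) by simp,
      List.zip_map, List.foldl_map,
      show (fun (nodes : PySem.Set String) (p : Nat × Nat) =>
              pvCleanStep nodes (PySem.Chars.slice t
                (some ((Prod.map (fun n : Nat => (n : Int)) (fun n : Nat => (n : Int)) p).1))
                (some ((Prod.map (fun n : Nat => (n : Int)) (fun n : Nat => (n : Int)) p).2))))
        = (fun (nodes : PySem.Set String) (p : Nat × Nat) =>
              pvCleanStep nodes ((t.drop p.1).take (p.2 - p.1))) by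
        funext nodes p
        rw [Prod.map_fst, Prod.map_snd, pvChars_slice_eq, PySem.List.slice_natCast],
      ← List.foldl_map (f := fun (se : Nat × Nat) => (t.drop se.1).take (se.2 - se.1))
        (g := pvCleanStep)]
  rw [show ((((0 : Nat) :: (cutsK t 0 0).map (· + 1)).zip ((cutsK t 0 0) ++ [t.length])).map
        (fun (se : Nat × Nat) => (t.drop se.1).take (se.2 - se.1))) = pvSegs t (cutsK t 0 0)
        from rfl,
      pvSegs_cutsK]
  norm_num

-- ===== VERDICT (by name: the statement is the Claim_ definition above) =====
theorem parse_intermediate_nodes_spec : Claim_equal_parse_intermediate_nodes := by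
  intro node_str _
  unfold Spec_parse_intermediate_nodes
  exact pv_main _
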